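-- pv_equiv track=rewrite | github.com/Easymove/lazyCalculator | sandbox.py | matrix_column
-- ===== SOURCE A (Python) =====
-- def matrix_column(matrix, n, max_val_count: object=1):
--     col = {}
--     for row in matrix:
--         old_val = col.get(row[n], 0)
--         col.update({row[n]: old_val + 1})
--
--     result_set = set()
--     for val, freq in col.items():
--         if freq >= max_val_count:
--             result_set.add(val)
--
--     return result_set
-- ===== SOURCE B (Python) =====
-- def matrix_column(matrix, n, max_val_count=1):
--     col = [row[n] for row in matrix]
--     result = set()
--     seen = set()
--     for v in col:
--         if v not in seen:
--             seen.add(v)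
--             if col.count(v) >= max_val_count:
--                 result.add(v)
--     return result
-- ===== Notes on version B (the rewrite author's own statement) =====
-- stated objective: alternative
-- what changed: Replaces the dict frequency table plus a second filtering pass over its items with a single pass over the extracted column that counts each first-seen value directly via list.count.
import Mathlib
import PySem

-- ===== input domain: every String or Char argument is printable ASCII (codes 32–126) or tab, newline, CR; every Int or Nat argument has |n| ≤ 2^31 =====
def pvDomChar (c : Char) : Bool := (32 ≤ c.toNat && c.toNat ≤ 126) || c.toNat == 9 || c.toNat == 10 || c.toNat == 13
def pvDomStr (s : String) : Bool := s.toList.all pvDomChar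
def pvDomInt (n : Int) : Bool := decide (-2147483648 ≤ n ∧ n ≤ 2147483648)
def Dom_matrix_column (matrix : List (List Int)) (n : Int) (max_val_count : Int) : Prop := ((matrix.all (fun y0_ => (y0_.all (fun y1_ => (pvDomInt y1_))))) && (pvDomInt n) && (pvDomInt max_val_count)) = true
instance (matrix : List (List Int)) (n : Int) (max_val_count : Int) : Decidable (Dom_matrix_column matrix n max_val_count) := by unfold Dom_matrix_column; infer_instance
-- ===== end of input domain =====

-- B replaces A's dict frequency table + second filtering pass with one dedup pass that
-- counts each first-seen column value directly (alternative decomposition, not faster).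

-- ===== PORT A =====
-- row[n] is PySem.List.pyGet?; 'none' (IndexError) is excluded by Pre_matrix_column, so '.getD 0' is never taken there.
def matrix_column (matrix : List (List Int)) (n : Int) (max_val_count : Int) : List Int :=
  let col : PySem.Dict Int Int := matrix.foldl (fun col row =>
    let old_val := col.getD ((PySem.List.pyGet? row n).getD 0) 0
    col.insert ((PySem.List.pyGet? row n).getD 0) (old_val + 1)) PySem.Dict.empty
  let result_set : PySem.Set Int := col.items.foldl (fun s p =>
    if p.2 ≥ max_val_count then PySem.Set.add s p.1 else s) PySem.Set.empty
  result_set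

-- ===== PORT B =====
def matrix_column_alt (matrix : List (List Int)) (n : Int) (max_val_count : Int) : List Int :=
  let col : List Int := matrix.map (fun row => (PySem.List.pyGet? row n).getD 0)
  let p : PySem.Set Int × PySem.Set Int := col.foldl (fun p v =>
    if PySem.Set.contains p.2 v then p
    else ((if (PySem.List.count col v : Int) ≥ max_val_count then PySem.Set.add p.1 v else p.1),
          PySem.Set.add p.2 v))
    (PySem.Set.empty, PySem.Set.empty)
  p.1

-- ===== PRECONDITION & SPEC =====
-- Exactly the inputs where every row[n] is in range (otherwise Python A raises IndexError).
def Pre_matrix_column (matrix : List (List Int)) (n : Int) (max_val_count : Int) : Prop :=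
  ∀ row ∈ matrix, PySem.Raise.InRange row.length n
instance (matrix : List (List Int)) (n : Int) (max_val_count : Int) : Decidable (Pre_matrix_column matrix n max_val_count) := by unfold Pre_matrix_column; infer_instance
def pvWitness_matrix_column : List (List Int) × Int × Int := ([[1, 2], [3, 2], [1, 5]], 1, 2)

def Spec_matrix_column (matrix : List (List Int)) (n : Int) (max_val_count : Int) (out : List Int) : Prop := out = matrix_column_alt matrix n max_val_count
instance (matrix : List (List Int)) (n : Int) (max_val_count : Int) (out : List Int) : Decidable (Spec_matrix_column matrix n max_val_count out) := by unfold Spec_matrix_column; infer_instance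

-- ===== CLAIM (what is proved, stated in full; the proofs are below) =====
def Claim_equal_matrix_column : Prop := ∀ (matrix : List (List Int)) (n : Int) (max_val_count : Int), Dom_matrix_column matrix n max_val_count → Pre_matrix_column matrix n max_val_count → Spec_matrix_column matrix n max_val_count (matrix_column matrix n max_val_count)

-- ===== LEMMAS AND PROOFS =====

-- The first-seen elements of l that are not yet in seen, in first-occurrence order
-- (the values B's loop processes).
def newElems (seen : PySem.Set Int) : List Int → List Int
  | [] => []
  | v :: l => if PySem.Set.contains seen v then newElems seen l
              else v :: newElems (PySem.Set.add seen v) l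

theorem update_eq_append_newElems (l : List Int) :
    ∀ seen : PySem.Set Int, PySem.Set.update seen l = seen ++ newElems seen l := by
  induction l with
  | nil => intro seen; simp [PySem.Set.update, newElems]
  | cons v l ih =>
    intro seen
    have ihs := ih seen
    have iha := ih (PySem.Set.add seen v)
    simp only [PySem.Set.update, List.foldl_cons] at ihs iha ⊢
    by_cases h : v ∈ seen
    · have hadd : PySem.Set.add seen v = seen := by
        simp [PySem.Set.add, h]
      rw [hadd, ihs]
      simp [newElems, h]
    · have hadd : PySem.Set.add seen v = seen ++ [v] := by
        simp [PySem.Set.add, h]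
      rw [iha, hadd]
      simp [newElems, h]

theorem ofList_eq_newElems (l : List Int) : PySem.Set.ofList l = newElems PySem.Set.empty l := by
  have := update_eq_append_newElems l PySem.Set.empty
  simpa [PySem.Set.ofList_eq_foldl, PySem.Set.update, PySem.Set.empty] using this

-- B's fused loop = the plain add-if fold over the first-seen elements, with the seen set updated.
theorem bfold_eq (cond : Int → Prop) [DecidablePred cond] (l : List Int) :
    ∀ (r seen : PySem.Set Int),
    l.foldl (fun p v =>
        if PySem.Set.contains p.2 v then p
        else ((if cond v then PySem.Set.add p.1 v else p.1), PySem.Set.add p.2 v)) (r, seen)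
    = ((newElems seen l).foldl (fun s v => if cond v then PySem.Set.add s v else s) r,
       PySem.Set.update seen l) := by
  induction l with
  | nil => intro r seen; simp [newElems, PySem.Set.update]
  | cons v l ih =>
    intro r seen
    simp only [PySem.Set.update, List.foldl_cons]
    by_cases h : v ∈ seen
    · have hadd : PySem.Set.add seen v = seen := by
        simp [PySem.Set.add, h]
      simp only [newElems, h, PySem.Set.contains_eq_listContains, List.contains_eq_mem,
        decide_true, if_true, hadd]
      simpa [PySem.Set.update] using ih r seen
    · simp only [newElems, h, PySem.Set.contains_eq_listContains, List.contains_eq_mem,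
        if_false]
      simpa [PySem.Set.update] using
        ih (if cond v then PySem.Set.add r v else r) (PySem.Set.add seen v)

-- ===== VERDICT (by name: the statement is the Claim_ definition above) =====
theorem matrix_column_spec : Claim_equal_matrix_column := by
  intro matrix n max_val_count _ _
  unfold Spec_matrix_column matrix_column matrix_column_alt
  simp only
  set f : List Int → Int := fun row => (PySem.List.pyGet? row n).getD 0 with hf
  set vs : List Int := matrix.map f with hvs
  have hA : matrix.foldl (fun col row =>
      col.insert (f row) (col.getD (f row) 0 + 1)) PySem.Dict.empty
      = PySem.Dict.counter vs := by
    rw [← PySem.Dict.foldl_insert_getD_add_one_eq_counter, hvs, List.foldl_map]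
  rw [hA, PySem.Dict.items_counter, List.foldl_map,
      bfold_eq (fun v => (PySem.List.count vs v : Int) ≥ max_val_count) vs,
      ← ofList_eq_newElems]
  apply PySem.List.foldl_congr_mem
  intro acc x hx
  simp [PySem.List.count]
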